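-- pv_equiv track=rewrite | github.com/elnatanKleinmen/Biological_Computation | ex2.py | undirect_graph
-- ===== SOURCE A (Python) =====
-- import copy
--
-- def undirect_graph(graph):
--     undirected_graph = copy.deepcopy(graph)
--     for key in graph:
--         if graph.get(key, []):
--             for v in graph[key]:
--                 if key not in undirected_graph.get(v, []):
--                     undirected_graph[v] = undirected_graph.get(v, []) + [key]
--     return undirected_graph
-- ===== SOURCE B (Python) =====
-- import copy
--
-- def undirect_graph(graph):
--     # First pass: reverse-adjacency index preds[v] = de-duplicated, traversal-ordered
--     # list of nodes u with v in graph[u].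
--     preds = {}
--     for u, nbrs in graph.items():
--         for v in nbrs:
--             lst = preds.get(v, [])
--             if u not in lst:
--                 preds[v] = lst + [u]
--     # Second pass: append to each node's list the reverse edges it does not already have.
--     result = copy.deepcopy(graph)
--     for v, us in preds.items():
--         orig = graph.get(v, [])
--         new = [u for u in us if u not in orig]
--         if new:
--             result[v] = result.get(v, []) + new
--     return result
-- ===== Notes on version B (the rewrite author's own statement) =====
-- stated objective: alternative
-- what changed: Instead of querying and mutating the evolving output dict inside the nested loops, B first builds a de-duplicated reverse-adjacency index preds in one pass and then merges it into a deepcopy of the graph in a second pass, filtering only against the original adjacency lists.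
import Mathlib
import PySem

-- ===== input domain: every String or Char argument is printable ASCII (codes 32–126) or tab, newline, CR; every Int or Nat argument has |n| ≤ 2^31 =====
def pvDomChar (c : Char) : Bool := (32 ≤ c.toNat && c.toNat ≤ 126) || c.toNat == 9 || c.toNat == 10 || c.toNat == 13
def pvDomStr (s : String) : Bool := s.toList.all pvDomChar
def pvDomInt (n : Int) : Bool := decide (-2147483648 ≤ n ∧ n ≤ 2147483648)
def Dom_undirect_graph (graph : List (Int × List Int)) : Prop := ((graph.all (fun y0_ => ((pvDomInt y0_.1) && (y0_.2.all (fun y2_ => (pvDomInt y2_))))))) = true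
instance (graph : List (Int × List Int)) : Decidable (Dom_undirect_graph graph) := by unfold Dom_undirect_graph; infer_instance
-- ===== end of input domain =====

-- B builds a reverse-adjacency index in one pass and merges it in a second pass, instead of
-- querying the evolving output dict inside the nested loops (alternative decomposition, same cost).


-- ===== PORT A =====
def undirect_graph (graph : List (Int × List Int)) : List (Int × List Int) :=
  let g : PySem.Dict Int (List Int) := PySem.Dict.mk graph
  -- undirected_graph = copy.deepcopy(graph)
  (g.keys.foldl (fun ug key =>
      -- if graph.get(key, []):
      if g.getD key [] ≠ [] then
        -- for v in graph[key]:
        (g.getD key []).foldl (fun ug v =>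
          -- if key not in undirected_graph.get(v, []):
          if key ∉ ug.getD v [] then ug.insert v (ug.getD v [] ++ [key]) else ug) ug
      else ug) g).items

-- ===== PORT B =====
def undirect_graph_alt (graph : List (Int × List Int)) : List (Int × List Int) :=
  let g : PySem.Dict Int (List Int) := PySem.Dict.mk graph
  -- first pass: preds[v] = de-duplicated traversal-ordered predecessors of v
  let preds : PySem.Dict Int (List Int) :=
    g.items.foldl (fun p pair =>
      pair.2.foldl (fun p v =>
        let lst := p.getD v []
        if pair.1 ∉ lst then p.insert v (lst ++ [pair.1]) else p) p) PySem.Dict.empty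
  -- second pass: result = deepcopy(graph); merge the filtered reverse edges in
  (preds.items.foldl (fun r pair =>
      let orig := g.getD pair.1 []
      let nw := pair.2.filter (fun u => u ∉ orig)
      if nw ≠ [] then r.insert pair.1 (r.getD pair.1 [] ++ nw) else r) g).items

-- ===== PRECONDITION & SPEC =====
-- Pre_ excludes association lists with duplicate keys: those do not represent a Python dict
-- (Python collapses them before A even runs), so their behaviour is a representation artefact.
def Pre_undirect_graph (graph : List (Int × List Int)) : Prop := (graph.map Prod.fst).Nodup
instance (graph : List (Int × List Int)) : Decidable (Pre_undirect_graph graph) := by unfold Pre_undirect_graph; infer_instance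
def pvWitness_undirect_graph : (List (Int × List Int)) := [(1, [2, 3]), (2, [1]), (4, [])]

def Spec_undirect_graph (graph : List (Int × List Int)) (out : List (Int × List Int)) : Prop := out = undirect_graph_alt graph
instance (graph : List (Int × List Int)) (out : List (Int × List Int)) : Decidable (Spec_undirect_graph graph out) := by unfold Spec_undirect_graph; infer_instance

-- ===== CLAIM (what is proved, stated in full; the proofs are below) =====
def Claim_equal_undirect_graph : Prop := ∀ (graph : List (Int × List Int)), Dom_undirect_graph graph → Pre_undirect_graph graph → Spec_undirect_graph graph (undirect_graph graph)

-- ===== LEMMAS AND PROOFS =====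

-- The one-edge step both nested loops perform on a dict (A on the output, B on preds).
def ugStep (d : PySem.Dict Int (List Int)) (uv : Int × Int) : PySem.Dict Int (List Int) :=
  if uv.1 ∉ d.getD uv.2 [] then d.insert uv.2 (d.getD uv.2 [] ++ [uv.1]) else d

-- The per-node step: all edges out of one node.
def ugBig (d : PySem.Dict Int (List Int)) (pair : Int × List Int) : PySem.Dict Int (List Int) :=
  pair.2.foldl (fun d v => ugStep d (pair.1, v)) d

-- B's second pass as a fold over an items list, parameterised by the original dict g.
def mrgL (g r : PySem.Dict Int (List Int)) (items : List (Int × List Int)) : PySem.Dict Int (List Int) :=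
  items.foldl (fun r pair =>
      let nw := pair.2.filter (fun u => u ∉ g.getD pair.1 [])
      if nw ≠ [] then r.insert pair.1 (r.getD pair.1 [] ++ nw) else r) r

theorem mrgL_cons (g r : PySem.Dict Int (List Int)) (x : Int × List Int) (t : List (Int × List Int)) :
    mrgL g r (x :: t) =
      mrgL g (if x.2.filter (fun u => u ∉ g.getD x.1 []) ≠ []
              then r.insert x.1 (r.getD x.1 [] ++ x.2.filter (fun u => u ∉ g.getD x.1 []))
              else r) t := rfl

theorem mrgL_append (g r : PySem.Dict Int (List Int)) (l1 l2 : List (Int × List Int)) :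
    mrgL g r (l1 ++ l2) = mrgL g (mrgL g r l1) l2 := by
  simp [mrgL, List.foldl_append]

theorem pv_not_mem_fst (d : PySem.Dict Int (List Int)) (k : Int) (hc : d.contains k = false) :
    k ∉ d.items.map Prod.fst := by
  intro hm
  have : d.contains k = true := (PySem.Dict.contains_iff_mem_keys d k).mpr hm
  rw [this] at hc; cases hc

theorem pv_map_noop (l : List (Int × List Int)) (v : Int) (w : List Int)
    (h : v ∉ l.map Prod.fst) :
    l.map (fun p => if (p.1 == v) = true then (v, w) else p) = l := by
  induction l with
  | nil => rfl
  | cons x t ih =>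
    simp only [List.map_cons, List.mem_cons, not_or] at h ⊢
    have hx : (x.1 == v) = false := by
      simp only [beq_eq_false_iff_ne, ne_eq]
      exact fun he => h.1 he.symm
    rw [hx]
    simp only [Bool.false_eq_true, if_false]
    rw [ih h.2]

theorem pv_insert_insert_same (d : PySem.Dict Int (List Int)) (k : Int) (a b : List Int) :
    (d.insert k a).insert k b = d.insert k b := by
  apply PySem.Dict.ext
  by_cases hc : d.contains k = true
  · rw [PySem.Dict.items_insert_of_contains _ _
        (by simp : (d.insert k a).contains k = true),
        PySem.Dict.items_insert_of_contains _ _ hc,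
        PySem.Dict.items_insert_of_contains _ _ hc, List.map_map]
    apply List.map_congr_left
    intro p _
    by_cases h : p.1 = k <;> simp [h]
  · have hc' : d.contains k = false := by simpa using hc
    rw [PySem.Dict.items_insert_of_contains _ _
          (by simp : (d.insert k a).contains k = true),
        PySem.Dict.items_insert_of_not_contains _ _ hc',
        PySem.Dict.items_insert_of_not_contains _ _ hc',
        List.map_append,
        pv_map_noop d.items k b (pv_not_mem_fst d k hc')]
    simp

theorem pv_insert_comm (d : PySem.Dict Int (List Int)) (v v' : Int) (Y X : List Int)
    (hv : d.contains v = true) (hne : v' ≠ v) :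
    (d.insert v Y).insert v' X = (d.insert v' X).insert v Y := by
  apply PySem.Dict.ext
  by_cases hc' : d.contains v' = true
  · rw [PySem.Dict.items_insert_of_contains _ _
        (by simp [PySem.Dict.contains_insert, hc'] : (d.insert v Y).contains v' = true),
        PySem.Dict.items_insert_of_contains _ _ hv,
        PySem.Dict.items_insert_of_contains _ _
          (by simp [PySem.Dict.contains_insert, hv] : (d.insert v' X).contains v = true),
        PySem.Dict.items_insert_of_contains _ _ hc', List.map_map, List.map_map]
    apply List.map_congr_left
    intro p _
    by_cases h1 : p.1 = v <;> by_cases h2 : p.1 = v' <;>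
      simp [h1, h2, hne, Ne.symm hne]
  · have hc'' : d.contains v' = false := by simpa using hc'
    rw [PySem.Dict.items_insert_of_not_contains _ _
        (by simp [PySem.Dict.contains_insert, hc'', hne] : (d.insert v Y).contains v' = false),
        PySem.Dict.items_insert_of_contains _ _ hv,
        PySem.Dict.items_insert_of_contains _ _
          (by simp [PySem.Dict.contains_insert, hv] : (d.insert v' X).contains v = true),
        PySem.Dict.items_insert_of_not_contains _ _ hc'', List.map_append]
    simp
    exact fun h => absurd h hne

theorem pv_getD_mrgL (g r : PySem.Dict Int (List Int)) (items : List (Int × List Int))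
    (v : Int) (d0 : List Int) (h : v ∉ items.map Prod.fst) :
    (mrgL g r items).getD v d0 = r.getD v d0 := by
  induction items generalizing r with
  | nil => rfl
  | cons x t ih =>
    simp only [List.map_cons, List.mem_cons, not_or] at h
    rw [mrgL_cons]
    rw [ih _ h.2]
    by_cases hnw : x.2.filter (fun u => u ∉ g.getD x.1 []) ≠ []
    · rw [if_pos hnw, PySem.Dict.getD_insert_of_ne _ _ _ h.1]
    · rw [if_neg hnw]

theorem pv_contains_mrgL (g r : PySem.Dict Int (List Int)) (items : List (Int × List Int))
    (v : Int) (h : r.contains v = true) :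
    (mrgL g r items).contains v = true := by
  induction items generalizing r with
  | nil => exact h
  | cons x t ih =>
    rw [mrgL_cons]
    by_cases hnw : x.2.filter (fun u => u ∉ g.getD x.1 []) ≠ []
    · rw [if_pos hnw]; exact ih _ (by simp [PySem.Dict.contains_insert, h])
    · rw [if_neg hnw]; exact ih _ h

theorem pv_mrgL_insert_out (g r : PySem.Dict Int (List Int)) (items : List (Int × List Int))
    (v : Int) (Y : List Int) (h : v ∉ items.map Prod.fst) (hc : r.contains v = true) :
    mrgL g (r.insert v Y) items = (mrgL g r items).insert v Y := by
  induction items generalizing r with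
  | nil => rfl
  | cons x t ih =>
    simp only [List.map_cons, List.mem_cons, not_or] at h
    rw [mrgL_cons, mrgL_cons]
    rw [PySem.Dict.getD_insert_of_ne _ _ _ (by exact fun he => h.1 he.symm : x.1 ≠ v)]
    by_cases hnw : x.2.filter (fun u => u ∉ g.getD x.1 []) ≠ []
    · rw [if_pos hnw, if_pos hnw]
      rw [pv_insert_comm r v x.1 Y _ hc (fun he => h.1 he.symm)]
      exact ih _ h.2 (by simp [PySem.Dict.contains_insert, hc])
    · rw [if_neg hnw, if_neg hnw]
      exact ih _ h.2 hc

theorem pv_split (p : PySem.Dict Int (List Int)) (v : Int)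
    (hnd : p.keys.Nodup) (hc : p.contains v = true) :
    ∃ pre post, p.items = pre ++ (v, p.getD v []) :: post ∧
      v ∉ pre.map Prod.fst ∧ v ∉ post.map Prod.fst := by
  have hvk : v ∈ p.items.map Prod.fst := (PySem.Dict.contains_iff_mem_keys p v).mp hc
  obtain ⟨q, hq, hq1⟩ := List.mem_map.mp hvk
  have hqv : q = (v, q.2) := by rw [← hq1]
  have hmem : (v, q.2) ∈ p.items := hqv ▸ hq
  have hgd : p.getD v [] = q.2 := PySem.Dict.getD_of_mem_items p hmem hnd []
  obtain ⟨pre, post, hsplit⟩ := List.append_of_mem hmem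
  have hnd' : ((pre ++ (v, q.2) :: post).map Prod.fst).Nodup := by
    have : p.keys = p.items.map Prod.fst := rfl
    rw [this, hsplit] at hnd; exact hnd
  rw [List.map_append, List.map_cons] at hnd'
  obtain ⟨_, h2, h3⟩ := List.nodup_append.mp hnd'
  refine ⟨pre, post, ?_, ?_, ?_⟩
  · rw [hsplit, hgd]
  · intro hm
    exact (h3 v hm v (List.mem_cons_self)) rfl
  · exact (List.nodup_cons.mp h2).1

theorem pv_getD_mrg (g p : PySem.Dict Int (List Int)) (v : Int) (hnd : p.keys.Nodup) :
    (mrgL g g p.items).getD v [] =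
      g.getD v [] ++ (p.getD v []).filter (fun u => u ∉ g.getD v []) := by
  by_cases hc : p.contains v = true
  · obtain ⟨pre, post, hit, hpre, hpost⟩ := pv_split p v hnd hc
    rw [hit, mrgL_append, mrgL_cons, pv_getD_mrgL g _ post v [] hpost]
    by_cases hf : (p.getD v []).filter (fun u => u ∉ g.getD v []) ≠ []
    · rw [if_pos hf, PySem.Dict.getD_insert_self, pv_getD_mrgL g g pre v [] hpre]
    · rw [if_neg hf, pv_getD_mrgL g g pre v [] hpre]
      rw [not_ne_iff] at hf
      rw [hf, List.append_nil]
  · have hc' : p.contains v = false := by simpa using hc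
    rw [pv_getD_mrgL g g _ v [] (pv_not_mem_fst p v hc'),
        PySem.Dict.getD_of_not_contains _ _ hc']
    simp

theorem pv_comm_step (g p : PySem.Dict Int (List Int)) (u v : Int)
    (h1 : p.keys.Nodup) (h2 : ∀ w, p.contains w = true → p.getD w [] ≠ []) :
    ugStep (mrgL g g p.items) (u, v) = mrgL g g ((ugStep p (u, v)).items) := by
  have hX := pv_getD_mrg g p v h1
  by_cases h1m : u ∈ p.getD v []
  · -- both sides leave the dict unchanged
    have hXm : u ∈ (mrgL g g p.items).getD v [] := by
      rw [hX]
      by_cases hg : u ∈ g.getD v []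
      · exact List.mem_append_left _ hg
      · exact List.mem_append_right _ (List.mem_filter.mpr ⟨h1m, by simpa using hg⟩)
    simp [ugStep, hXm, h1m]
  · rw [show ugStep p (u, v) = p.insert v (p.getD v [] ++ [u]) by simp [ugStep, h1m]]
    by_cases hg : u ∈ g.getD v []
    · -- A does nothing; B records the edge in preds but the merge filters it out
      have hXm : u ∈ (mrgL g g p.items).getD v [] := by
        rw [hX]; exact List.mem_append_left _ hg
      rw [show ugStep (mrgL g g p.items) (u, v) = mrgL g g p.items by simp [ugStep, hXm]]
      by_cases hc : p.contains v = true
      · obtain ⟨pre, post, hit, hpre, hpost⟩ := pv_split p v h1 hc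
        have hveq : ((v, p.getD v []).1 == v) = true := by simp
        rw [PySem.Dict.items_insert_of_contains _ _ hc, hit, List.map_append, List.map_cons,
            pv_map_noop pre v _ hpre, if_pos hveq, pv_map_noop post v _ hpost]
        rw [mrgL_append, mrgL_append, mrgL_cons, mrgL_cons]
        have hfe : (p.getD v [] ++ [u]).filter (fun x => x ∉ g.getD v []) =
            (p.getD v []).filter (fun x => x ∉ g.getD v []) := by
          simp [List.filter_append, hg]
        rw [hfe]
      · have hc' : p.contains v = false := by simpa using hc
        rw [PySem.Dict.items_insert_of_not_contains _ _ hc', mrgL_append, mrgL_cons]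
        rw [PySem.Dict.getD_of_not_contains _ _ hc']
        simp [hg, mrgL]
    · -- both record the reverse edge
      have hXm : u ∉ (mrgL g g p.items).getD v [] := by
        rw [hX]
        intro hm
        rcases List.mem_append.mp hm with h | h
        · exact hg h
        · exact h1m (List.mem_filter.mp h).1
      rw [show ugStep (mrgL g g p.items) (u, v) =
            (mrgL g g p.items).insert v ((mrgL g g p.items).getD v [] ++ [u]) by
          simp [ugStep, hXm]]
      by_cases hc : p.contains v = true
      · obtain ⟨pre, post, hit, hpre, hpost⟩ := pv_split p v h1 hc
        have hus : p.getD v [] ≠ [] := h2 v hc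
        have hveq : ((v, p.getD v []).1 == v) = true := by simp
        have hfb : (p.getD v [] ++ [u]).filter (fun x => x ∉ g.getD v []) =
            (p.getD v []).filter (fun x => x ∉ g.getD v []) ++ [u] := by
          simp [List.filter_append, hg]
        rw [PySem.Dict.items_insert_of_contains _ _ hc, hit, List.map_append, List.map_cons,
            pv_map_noop pre v _ hpre, if_pos hveq, pv_map_noop post v _ hpost]
        rw [mrgL_append, mrgL_cons, mrgL_append, mrgL_cons]
        dsimp only
        rw [pv_getD_mrgL g _ post v [] hpost, hfb]
        set r0 := mrgL g g pre with hr0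
        set F := (p.getD v []).filter (fun x => x ∉ g.getD v []) with hF
        rw [if_pos (show F ++ [u] ≠ [] by simp)]
        by_cases hf : F = []
        · -- all earlier reverse edges into v were already forward edges; v is a key of g
          have hgk : g.contains v = true := by
            obtain ⟨x, hx⟩ := List.exists_mem_of_ne_nil _ hus
            have hxg : x ∈ g.getD v [] := by
              have := List.filter_eq_nil_iff.mp (hF.symm.trans hf) x hx
              simpa using this
            by_cases hgc : g.contains v = true
            · exact hgc
            · rw [PySem.Dict.getD_of_not_contains _ _ (by simpa using hgc)] at hxg
              exact absurd hxg (by simp)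
          rw [if_neg (show ¬ F ≠ [] from not_ne_iff.mpr hf)]
          rw [hf, List.nil_append,
              pv_mrgL_insert_out g _ post v _ hpost
                (pv_contains_mrgL g g pre v hgk)]
        · rw [if_pos hf]
          rw [PySem.Dict.getD_insert_self, ← List.append_assoc,
              ← pv_insert_insert_same r0 v (r0.getD v [] ++ F) (r0.getD v [] ++ F ++ [u]),
              pv_mrgL_insert_out g (r0.insert v (r0.getD v [] ++ F)) post v
                (r0.getD v [] ++ F ++ [u]) hpost (by simp)]
      · have hc' : p.contains v = false := by simpa using hc
        rw [PySem.Dict.items_insert_of_not_contains _ _ hc', mrgL_append, mrgL_cons]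
        rw [PySem.Dict.getD_of_not_contains _ _ hc']
        simp [hg, mrgL]

theorem pv_inv_step (p : PySem.Dict Int (List Int)) (u v : Int)
    (h1 : p.keys.Nodup) (h2 : ∀ w, p.contains w = true → p.getD w [] ≠ []) :
    (ugStep p (u, v)).keys.Nodup ∧
      (∀ w, (ugStep p (u, v)).contains w = true → (ugStep p (u, v)).getD w [] ≠ []) := by
  unfold ugStep
  by_cases hm : u ∈ p.getD v []
  · simp only [hm, not_true_eq_false, if_false]
    exact ⟨h1, h2⟩
  · simp only [hm, not_false_eq_true, if_true]
    refine ⟨PySem.Dict.nodup_keys_insert _ _ _ h1, ?_⟩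
    intro w hw
    by_cases hwv : w = v
    · subst hwv
      rw [PySem.Dict.getD_insert_self]
      simp
    · rw [PySem.Dict.getD_insert_of_ne _ _ _ hwv]
      apply h2
      rw [PySem.Dict.contains_insert] at hw
      simpa [hwv] using hw

theorem pv_inv_inner (u : Int) (nbrs : List Int) (p : PySem.Dict Int (List Int))
    (h1 : p.keys.Nodup) (h2 : ∀ w, p.contains w = true → p.getD w [] ≠ []) :
    (nbrs.foldl (fun d v => ugStep d (u, v)) p).keys.Nodup ∧
      (∀ w, (nbrs.foldl (fun d v => ugStep d (u, v)) p).contains w = true →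
        (nbrs.foldl (fun d v => ugStep d (u, v)) p).getD w [] ≠ []) := by
  induction nbrs generalizing p with
  | nil => exact ⟨h1, h2⟩
  | cons v t ih =>
    rw [List.foldl_cons]
    exact ih _ (pv_inv_step p u v h1 h2).1 (pv_inv_step p u v h1 h2).2

theorem pv_comm_inner (g : PySem.Dict Int (List Int)) (u : Int) (nbrs : List Int)
    (p : PySem.Dict Int (List Int))
    (h1 : p.keys.Nodup) (h2 : ∀ w, p.contains w = true → p.getD w [] ≠ []) :
    nbrs.foldl (fun d v => ugStep d (u, v)) (mrgL g g p.items) =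
      mrgL g g ((nbrs.foldl (fun d v => ugStep d (u, v)) p).items) := by
  induction nbrs generalizing p with
  | nil => rfl
  | cons v t ih =>
    rw [List.foldl_cons, List.foldl_cons, pv_comm_step g p u v h1 h2]
    exact ih _ (pv_inv_step p u v h1 h2).1 (pv_inv_step p u v h1 h2).2

theorem pv_comm_outer (g : PySem.Dict Int (List Int)) (items : List (Int × List Int))
    (p : PySem.Dict Int (List Int))
    (h1 : p.keys.Nodup) (h2 : ∀ w, p.contains w = true → p.getD w [] ≠ []) :
    items.foldl ugBig (mrgL g g p.items) = mrgL g g ((items.foldl ugBig p).items) := by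
  induction items generalizing p with
  | nil => rfl
  | cons x t ih =>
    rw [List.foldl_cons, List.foldl_cons,
        show ugBig (mrgL g g p.items) x =
          x.2.foldl (fun d v => ugStep d (x.1, v)) (mrgL g g p.items) from rfl,
        pv_comm_inner g x.1 x.2 p h1 h2]
    exact ih _ (pv_inv_inner x.1 x.2 p h1 h2).1 (pv_inv_inner x.1 x.2 p h1 h2).2

-- ===== VERDICT (by name: the statement is the Claim_ definition above) =====
theorem undirect_graph_spec : Claim_equal_undirect_graph := by
  intro graph _ hpre
  show undirect_graph graph = undirect_graph_alt graph
  have hnd : (PySem.Dict.mk graph).keys.Nodup := hpre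
  unfold undirect_graph undirect_graph_alt
  show ((PySem.Dict.mk graph).keys.foldl _ (PySem.Dict.mk graph)).items = _
  rw [show (PySem.Dict.mk graph).keys = graph.map Prod.fst from rfl, List.foldl_map]
  rw [PySem.List.foldl_congr_mem graph _ ugBig (PySem.Dict.mk graph) ?_]
  · rw [show (PySem.Dict.mk graph : PySem.Dict Int (List Int)) =
        mrgL (PySem.Dict.mk graph) (PySem.Dict.mk graph) (PySem.Dict.empty).items from rfl]
    rw [pv_comm_outer (PySem.Dict.mk graph) graph PySem.Dict.empty
        (by decide) (fun w hw => by simp [PySem.Dict.contains_empty] at hw)]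
    rfl
  · intro acc x hx
    have hget : (PySem.Dict.mk graph).getD x.1 [] = x.2 :=
      PySem.Dict.getD_of_mem_items (PySem.Dict.mk graph) (by exact hx) hnd []
    rw [hget]
    by_cases hx2 : x.2 = []
    · simp [ugBig, hx2]
    · rw [if_pos hx2]
      rfl
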